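-- pv_equiv track=rewrite | github.com/galra/PiContFracs | latex.py | latex_cont_frac
-- ===== SOURCE A (Python) =====
-- def latex_cont_frac(a, b, current_iteration=''):
--     len_a = len(a)
--     len_b = len(b)
--
--     if current_iteration == '':
--         current_iteration = str(a[len_a - 1]) + ' + \dots'
--
--     if len_a > 1:
--         new_iteration = r'{0} + \frac{{ {1} }} {{ {2} }}'.format(a[len_a - 2], b[len_b - 1], current_iteration)
--         return latex_cont_frac(a[:len_a - 1], b[:len_b - 1], new_iteration)
--     else:
--         return current_iteration
-- ===== SOURCE B (Python) =====
-- def latex_cont_frac(a, b, current_iteration=''):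
--     len_a = len(a)
--     len_b = len(b)
--     if current_iteration == '':
--         base = str(a[len_a - 1]) + ' + \dots'
--     else:
--         base = current_iteration
--     prefix = ''.join('{0} + \\frac{{ {1} }} {{ '.format(a[i], b[i + 1 + len_b - len_a])
--                      for i in range(len_a - 1))
--     return prefix + base + ' }' * (len_a - 1)
-- ===== Notes on version B (the rewrite author's own statement) =====
-- stated objective: faster
-- what changed: A recurses inner-to-outer, re-slicing both lists and re-wrapping the accumulated string at every step; B builds the result in one forward pass as prefix pieces + base term + a block of closing braces, with no recursion and no list slicing.
import Mathlib
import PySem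

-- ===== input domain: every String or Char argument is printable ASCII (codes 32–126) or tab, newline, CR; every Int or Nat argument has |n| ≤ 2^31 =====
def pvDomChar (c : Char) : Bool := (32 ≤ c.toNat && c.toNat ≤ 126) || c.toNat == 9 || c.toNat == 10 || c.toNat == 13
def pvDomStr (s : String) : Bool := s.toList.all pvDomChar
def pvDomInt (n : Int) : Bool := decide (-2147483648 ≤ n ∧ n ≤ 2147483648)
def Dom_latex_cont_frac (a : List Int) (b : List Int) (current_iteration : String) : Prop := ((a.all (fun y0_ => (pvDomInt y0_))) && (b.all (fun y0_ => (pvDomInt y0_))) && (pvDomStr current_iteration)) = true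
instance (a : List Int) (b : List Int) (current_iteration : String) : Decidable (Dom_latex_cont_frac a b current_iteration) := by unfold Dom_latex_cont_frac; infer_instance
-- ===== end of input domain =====

-- B builds the LaTeX string in one forward pass (prefix pieces + base + closing braces)
-- instead of A's inner-to-outer recursion that re-slices both lists at every step (objective: faster, measured).

-- ===== PORT A =====
def latex_cont_frac (a : List Int) (b : List Int) (current_iteration : String) : String :=
  let len_a := a.length
  let len_b := b.length
  let ci := if current_iteration = "" then
      PySem.Int.toStr ((PySem.List.pyGet? a ((len_a : Int) - 1)).getD 0) ++ " + \\dots"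
    else current_iteration
  if 1 < len_a then
    let new_iteration :=
      PySem.Int.toStr ((PySem.List.pyGet? a ((len_a : Int) - 2)).getD 0) ++ " + \\frac{ " ++
      PySem.Int.toStr ((PySem.List.pyGet? b ((len_b : Int) - 1)).getD 0) ++ " } { " ++ ci ++ " }"
    latex_cont_frac (PySem.List.slice a none (some ((len_a : Int) - 1)))
      (PySem.List.slice b none (some ((len_b : Int) - 1))) new_iteration
  else ci
termination_by a.length
decreasing_by
  have h1 : ((a.length : Int) - 1) = ((a.length - 1 : Nat) : Int) := by omega
  simp only [h1, PySem.List.slice_to_natCast, List.length_take]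
  omega

-- ===== PORT B =====
def latex_cont_frac_alt (a : List Int) (b : List Int) (current_iteration : String) : String :=
  let len_a := a.length
  let len_b := b.length
  let base := if current_iteration = "" then
      PySem.Int.toStr ((PySem.List.pyGet? a ((len_a : Int) - 1)).getD 0) ++ " + \\dots"
    else current_iteration
  let pre := PySem.Str.join "" ((PySem.List.pyRange 0 ((len_a : Int) - 1) 1).map (fun i =>
      PySem.Int.toStr ((PySem.List.pyGet? a i).getD 0) ++ " + \\frac{ " ++
      PySem.Int.toStr ((PySem.List.pyGet? b (i + 1 + (len_b : Int) - (len_a : Int))).getD 0) ++ " } { "))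
  -- ' }' * (len_a - 1): Nat subtraction clamps at 0 exactly as Python's str * n does for n ≤ 0
  pre ++ base ++ PySem.Str.join "" (List.replicate (len_a - 1) " }")

-- ===== PRECONDITION & SPEC =====
-- Pre_ excludes exactly the inputs where A raises IndexError: a == [] with the default
-- current_iteration (a[-1] on an empty list), and b shorter than len(a)-1 (b[-1] on an empty list
-- during the recursion).
def Pre_latex_cont_frac (a : List Int) (b : List Int) (current_iteration : String) : Prop :=
  (a = [] → current_iteration ≠ "") ∧ a.length ≤ b.length + 1
instance (a : List Int) (b : List Int) (current_iteration : String) : Decidable (Pre_latex_cont_frac a b current_iteration) := by unfold Pre_latex_cont_frac; infer_instance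

def pvWitness_latex_cont_frac : List Int × List Int × String := ([1, 2], [3], "")

def Spec_latex_cont_frac (a : List Int) (b : List Int) (current_iteration : String) (out : String) : Prop := out = latex_cont_frac_alt a b current_iteration
instance (a : List Int) (b : List Int) (current_iteration : String) (out : String) : Decidable (Spec_latex_cont_frac a b current_iteration out) := by unfold Spec_latex_cont_frac; infer_instance

-- ===== CLAIM (what is proved, stated in full; the proofs are below) =====
def Claim_equal_latex_cont_frac : Prop := ∀ (a : List Int) (b : List Int) (current_iteration : String), Dom_latex_cont_frac a b current_iteration → Pre_latex_cont_frac a b current_iteration → Spec_latex_cont_frac a b current_iteration (latex_cont_frac a b current_iteration)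

-- ===== LEMMAS AND PROOFS =====

-- one prefix piece, as characters (indices exactly as in B)
def pvPiece (a b : List Int) (k : Nat) : List Char :=
  PySem.Int.toChars ((PySem.List.pyGet? a (k : Int)).getD 0) ++ (" + \\frac{ ").toList ++
  PySem.Int.toChars ((PySem.List.pyGet? b ((k : Int) + 1 + (b.length : Int) - (a.length : Int))).getD 0) ++
  (" } { ").toList

def pvClose (n : Nat) : List Char := (List.replicate n (" }".toList)).flatten

lemma pvJoin_empty (l : List (List Char)) : PySem.Chars.join [] l = l.flatten := by
  simp only [PySem.Chars.join, List.intercalate]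
  induction l with
  | nil => rfl
  | cons x xs ih =>
    cases xs with
    | nil => simp
    | cons y ys => simp_all [List.intersperse]

lemma pvStr_app_ne (s t : String) (ht : t ≠ "") : s ++ t ≠ "" := by
  intro h
  have h2 := congrArg String.toList h
  simp only [String.toList_append] at h2
  have h3 : t.toList = [] := (List.append_eq_nil_iff.mp (h2.trans rfl)).2
  exact ht (String.toList_inj.mp (h3.trans rfl))

lemma pvPiece_drop (a b : List Int) (k : Nat)
    (ha : 2 ≤ a.length) (hb : a.length ≤ b.length + 1) (hk : k < a.length - 2) :
    pvPiece a.dropLast b.dropLast k = pvPiece a b k := by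
  unfold pvPiece
  have h1 : a.dropLast.length = a.length - 1 := List.length_dropLast (xs := a)
  have h2 : b.dropLast.length = b.length - 1 := List.length_dropLast (xs := b)
  have hidx : ((k : Int) + 1 + (b.dropLast.length : Int) - (a.dropLast.length : Int))
      = ((k + 1 + b.length - a.length : Nat) : Int) := by rw [h1, h2]; omega
  have hidx2 : ((k : Int) + 1 + (b.length : Int) - (a.length : Int))
      = ((k + 1 + b.length - a.length : Nat) : Int) := by omega
  rw [hidx, hidx2]
  have hga : a.dropLast[(k : Nat)]? = a[(k : Nat)]? := by
    rw [List.getElem?_dropLast, if_pos (by omega)]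
  have hgb : b.dropLast[(k + 1 + b.length - a.length : Nat)]? = b[(k + 1 + b.length - a.length : Nat)]? := by
    rw [List.getElem?_dropLast, if_pos (by omega)]
  simp only [PySem.List.pyGet?_natCast, hga, hgb]

-- characterisation of A's recursion for a non-empty current_iteration
lemma pvA_chars : ∀ (n : Nat) (a b : List Int) (ci : String), a.length = n → ci ≠ "" →
    a.length ≤ b.length + 1 →
    (latex_cont_frac a b ci).toList =
      ((List.range (a.length - 1)).map (pvPiece a b)).flatten ++ ci.toList ++ pvClose (a.length - 1) := by
  intro n
  induction n with
  | zero =>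
    intro a b ci ha hci _
    have ha0 : a = [] := List.eq_nil_of_length_eq_zero ha
    subst ha0
    rw [latex_cont_frac]
    simp [hci, pvClose]
  | succ m ih =>
    intro a b ci ha hci hb
    by_cases hm : m = 0
    · subst hm
      rw [latex_cont_frac]
      simp [hci, ha, pvClose]
    · -- a.length = m + 1 ≥ 2
      rw [latex_cont_frac]
      simp only [hci, ha, if_pos (by omega : 1 < m + 1)]
      rw [if_neg (by exact fun h => h.elim)]
      have e1 : ((m + 1 : Nat) : Int) - 1 = ((m : Nat) : Int) := by push_cast; ring
      have hlb : 1 ≤ b.length := by omega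
      have e2 : ((b.length : Nat) : Int) - 1 = ((b.length - 1 : Nat) : Int) := by omega
      rw [e1, e2, PySem.List.slice_to_natCast, PySem.List.slice_to_natCast]
      have hda : a.take m = a.dropLast := by rw [List.dropLast_eq_take, ha]; norm_num
      have hdb : b.take (b.length - 1) = b.dropLast := by rw [List.dropLast_eq_take]
      rw [hda, hdb]
      have hlen : a.dropLast.length = m := by simp [ha]
      rw [ih _ _ _ hlen (pvStr_app_ne _ " }" (by decide))
        (by simp only [List.length_dropLast]; omega)]
      rw [hlen]
      obtain ⟨m', rfl⟩ : ∃ m', m = m' + 1 := ⟨m - 1, by omega⟩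
      simp only [Nat.add_sub_cancel]
      rw [List.range_succ, List.map_append, List.flatten_append,
        List.map_congr_left (fun k hk => pvPiece_drop a b k (by omega) hb
          (by rw [List.mem_range] at hk; omega))]
      have e3 : ((m' + 1 + 1 : Nat) : Int) - 2 = ((m' : Nat) : Int) := by push_cast; ring
      have e4 : ((m' : Nat) : Int) + 1 + (b.length : Int) - (a.length : Int) = ((b.length - 1 : Nat) : Int) := by
        rw [ha]; push_cast; omega
      simp only [pvPiece, e3, e4, List.map_singleton, String.toList_append,
        PySem.Int.toList_toStr, pvClose, List.replicate_succ, List.flatten_cons,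
        List.flatten_nil, List.nil_append, List.append_assoc]

-- characterisation of B
lemma pvB_chars (a b : List Int) (ci : String) :
    (latex_cont_frac_alt a b ci).toList =
      ((List.range (a.length - 1)).map (pvPiece a b)).flatten ++
      (if ci = "" then
        PySem.Int.toStr ((PySem.List.pyGet? a ((a.length : Int) - 1)).getD 0) ++ " + \\dots"
       else ci).toList ++ pvClose (a.length - 1) := by
  rw [latex_cont_frac_alt]
  cases a with
  | nil =>
    simp only [List.length_nil]
    rw [PySem.List.pyRange_one_eq_nil (by omega)]
    simp [pvClose, PySem.Str.join]
  | cons x xs =>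
    have hlen : (x :: xs).length = xs.length + 1 := rfl
    have e1 : (((x :: xs).length : Int)) - 1 = ((xs.length : Nat) : Int) := by
      rw [hlen]; push_cast; ring
    rw [e1, PySem.List.pyRange_one]
    have e0 : ((xs.length : Int) - 0).toNat = xs.length := by omega
    rw [e0]
    simp only [PySem.Str.join, List.map_map, List.map_replicate,
      String.toList_append, String.toList_ofList, List.append_assoc]
    have hemp : ("" : String).toList = [] := rfl
    rw [hemp, pvJoin_empty, pvJoin_empty]
    congr 1
    · rw [hlen, Nat.add_sub_cancel]
      congr 1
      apply List.map_congr_left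
      intro k _
      simp only [Function.comp, zero_add, pvPiece, String.toList_append,
        PySem.Int.toList_toStr, List.append_assoc, hlen]

-- with the default current_iteration, A first substitutes the base term; base ≠ "" lets us reuse pvA_chars
lemma pvA_empty (a b : List Int) :
    latex_cont_frac a b "" =
      latex_cont_frac a b
        (PySem.Int.toStr ((PySem.List.pyGet? a ((a.length : Int) - 1)).getD 0) ++ " + \\dots") := by
  conv_lhs => rw [latex_cont_frac]
  conv_rhs => rw [latex_cont_frac]
  rw [if_pos rfl, if_neg (pvStr_app_ne _ " + \\dots" (by decide))]

-- ===== VERDICT (by name: the statement is the Claim_ definition above) =====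
theorem latex_cont_frac_spec : Claim_equal_latex_cont_frac := by
  intro a b ci _ hpre
  obtain ⟨hne, hlen⟩ := hpre
  unfold Spec_latex_cont_frac
  apply String.toList_inj.mp
  rw [pvB_chars]
  by_cases hci : ci = ""
  · subst hci
    rw [if_pos rfl, pvA_empty,
      pvA_chars a.length a b _ rfl (pvStr_app_ne _ " + \\dots" (by decide)) hlen]
  · rw [if_neg hci, pvA_chars a.length a b ci rfl hci hlen]
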